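-- pv_equiv track=rewrite | github.com/shiladit/.cpp | the_great_XOR.py | theGreatXor
-- ===== SOURCE A (Python) =====
-- def decimal_to_binary(x,dec_num):
--
--     if(x > 1):
--         decimal_to_binary(x // 2,dec_num);
--     dec_num.append(x % 2);
--     return dec_num;
--
-- def theGreatXor(x):
--     dec_num = [];
--     dec_num = decimal_to_binary(x,dec_num);
--
--     sum_val = 0;
--     shift = 0;
--
--     for itr in reversed(dec_num):
--         if itr == 0:
--             sum_val += (1 << shift);
--         shift = shift + 1;
--
--     return sum_val;
-- ===== SOURCE B (Python) =====
-- def theGreatXor(x):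
--     result = 0
--     pos = 0
--     n = x
--     while True:
--         if n % 2 == 0:
--             result += 1 << pos
--         pos += 1
--         if n <= 1:
--             break
--         n //= 2
--     return result
-- ===== Notes on version B (the rewrite author's own statement) =====
-- stated objective: simpler
-- what changed: Replaces the recursive digit-list construction plus a second reversed summation pass with one iterative least-significant-bit-first loop that accumulates each zero bit's power of two directly, with no intermediate list and no recursion.
import Mathlib
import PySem

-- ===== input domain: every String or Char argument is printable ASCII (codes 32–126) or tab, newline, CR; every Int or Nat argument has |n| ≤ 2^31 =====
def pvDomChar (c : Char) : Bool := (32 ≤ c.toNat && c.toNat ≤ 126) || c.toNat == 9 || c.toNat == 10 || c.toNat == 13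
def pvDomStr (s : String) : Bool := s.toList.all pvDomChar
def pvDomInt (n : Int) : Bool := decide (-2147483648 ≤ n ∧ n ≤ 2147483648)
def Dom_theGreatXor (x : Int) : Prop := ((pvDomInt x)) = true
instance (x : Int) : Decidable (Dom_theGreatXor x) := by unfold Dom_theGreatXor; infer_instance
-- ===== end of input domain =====

-- B replaces A's recursive digit-list build plus a second reversed-summation pass by one
-- iterative LSB-first loop accumulating each zero bit's power of two directly (objective: simpler, no asymptotic change).

-- ===== PORT A =====
-- decimal_to_binary(x, dec_num): recursive, appends x % 2 after the recursive call
def decToBin (x : Int) (dec_num : List Int) : List Int :=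
  if _h : x > 1 then
    decToBin (PySem.Int.floordiv x 2) dec_num ++ [PySem.Int.mod x 2]
  else
    dec_num ++ [PySem.Int.mod x 2]
termination_by x.toNat
decreasing_by
  rw [PySem.Int.floordiv_eq_ediv_of_pos (by omega : (0:Int) < 2)]; omega

def theGreatXor (x : Int) : Int :=
  let dec_num : List Int := []
  let dec_num := decToBin x dec_num
  -- for itr in reversed(dec_num): … ; state = (sum_val, shift)
  (dec_num.reverse.foldl
    (fun (p : Int × Nat) itr =>
      (if itr = 0 then p.1 + ((1:Int) <<< p.2) else p.1, p.2 + 1))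
    (0, 0)).1

-- ===== PORT B =====
-- the while-True loop of Source B, state (result, pos, n)
def altLoop (result : Int) (pos : Nat) (n : Int) : Int :=
  let result := if PySem.Int.mod n 2 = 0 then result + ((1:Int) <<< pos) else result
  if _h : n ≤ 1 then result
  else altLoop result (pos + 1) (PySem.Int.floordiv n 2)
termination_by n.toNat
decreasing_by
  rw [PySem.Int.floordiv_eq_ediv_of_pos (by omega : (0:Int) < 2)]; omega

def theGreatXor_alt (x : Int) : Int := altLoop 0 0 x

-- ===== PRECONDITION & SPEC =====
def Spec_theGreatXor (x : Int) (out : Int) : Prop := out = theGreatXor_alt x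
instance (x : Int) (out : Int) : Decidable (Spec_theGreatXor x out) := by unfold Spec_theGreatXor; infer_instance

-- ===== CLAIM (what is proved, stated in full; the proofs are below) =====
def Claim_equal_theGreatXor : Prop := ∀ (x : Int), Dom_theGreatXor x → Spec_theGreatXor x (theGreatXor x)

-- ===== LEMMAS AND PROOFS =====

-- canonical value both programs compute: bit b of x contributes 2^b when that binary digit is 0
def pureX (n : Int) : Int :=
  (if PySem.Int.mod n 2 = 0 then 1 else 0)
  + (if _h : n ≤ 1 then 0 else 2 * pureX (PySem.Int.floordiv n 2))
termination_by n.toNat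
decreasing_by
  rw [PySem.Int.floordiv_eq_ediv_of_pos (by omega : (0:Int) < 2)]; omega

-- the sum A's loop computes on a LSB-first digit list, written structurally
def gL : List Int → Int
  | [] => 0
  | a :: L => (if a = 0 then 1 else 0) + 2 * gL L

-- one unfolding of decToBin with an empty accumulator
theorem decToBin_nil (x : Int) :
    decToBin x [] =
      (if x > 1 then decToBin (PySem.Int.floordiv x 2) [] else []) ++ [PySem.Int.mod x 2] := by
  rw [decToBin]; split_ifs <;> simp

-- one unfolding of altLoop (ite form)
theorem altLoop_eq (s : Int) (p : Nat) (n : Int) :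
    altLoop s p n =
      (let r := if PySem.Int.mod n 2 = 0 then s + ((1:Int) <<< p) else s;
       if n ≤ 1 then r else altLoop r (p + 1) (PySem.Int.floordiv n 2)) := by
  conv_lhs => rw [altLoop]
  split_ifs <;> rfl

-- one unfolding of pureX (ite form)
theorem pureX_eq (n : Int) :
    pureX n =
      (if PySem.Int.mod n 2 = 0 then 1 else 0)
      + (if n ≤ 1 then 0 else 2 * pureX (PySem.Int.floordiv n 2)) := by
  conv_lhs => rw [pureX]
  split_ifs <;> rfl

-- A's summation loop: the running sum enters linearly, the shift as a power of two
theorem foldA_g (L : List Int) (s : Int) (p : Nat) :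
    (L.foldl
      (fun (q : Int × Nat) itr =>
        (if itr = 0 then q.1 + ((1:Int) <<< q.2) else q.1, q.2 + 1))
      (s, p)).1 = s + 2 ^ p * gL L := by
  induction L generalizing s p with
  | nil => simp [gL]
  | cons a L ih =>
    simp only [List.foldl_cons]
    rw [ih]
    simp only [gL]
    split_ifs <;> simp [Int.shiftLeft_eq, pow_succ] <;> ring

-- A's digit list, reversed, sums to the canonical value
theorem gL_decToBin : ∀ (k : Nat) (x : Int), x.toNat ≤ k →
    gL ((decToBin x []).reverse) = pureX x := by
  intro k
  induction k with
  | zero =>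
    intro x hx
    rw [decToBin_nil, pureX_eq]
    simp only [List.reverse_cons, List.reverse_nil, List.nil_append,
      if_neg (by omega : ¬ x > 1), if_pos (by omega : x ≤ 1), gL]
    split_ifs <;> ring
  | succ k ih =>
    intro x hx
    rw [decToBin_nil, pureX_eq]
    by_cases hle : x ≤ 1
    · simp only [List.reverse_cons, List.reverse_nil, List.nil_append,
        if_neg (by omega : ¬ x > 1), if_pos hle, gL]
      split_ifs <;> ring
    · have hlt : (PySem.Int.floordiv x 2).toNat ≤ k := by
        rw [PySem.Int.floordiv_eq_ediv_of_pos (by omega : (0:Int) < 2)]; omega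
      simp only [List.reverse_append, List.reverse_cons, List.reverse_nil, List.nil_append,
        List.singleton_append, if_pos (by omega : x > 1), if_neg hle, gL]
      rw [ih _ hlt]
  -- goal closed: both sides are bit + 2 * pureX (x // 2)

-- B's loop: result enters linearly, pos as a power of two, remainder is the canonical value
theorem altLoop_pure : ∀ (k : Nat) (n : Int), n.toNat ≤ k → ∀ (s : Int) (p : Nat),
    altLoop s p n = s + 2 ^ p * pureX n := by
  intro k
  induction k with
  | zero =>
    intro n hn s p
    rw [altLoop_eq, pureX_eq]
    simp only [if_pos (by omega : n ≤ 1)]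
    split_ifs <;> simp [Int.shiftLeft_eq]
  | succ k ih =>
    intro n hn s p
    rw [altLoop_eq, pureX_eq]
    by_cases hle : n ≤ 1
    · simp only [if_pos hle]
      split_ifs <;> simp [Int.shiftLeft_eq]
    · have hlt : (PySem.Int.floordiv n 2).toNat ≤ k := by
        rw [PySem.Int.floordiv_eq_ediv_of_pos (by omega : (0:Int) < 2)]; omega
      simp only [if_neg hle]
      rw [ih _ hlt]
      split_ifs <;> simp [Int.shiftLeft_eq, pow_succ] <;> ring

-- ===== VERDICT (by name: the statement is the Claim_ definition above) =====
theorem theGreatXor_spec : Claim_equal_theGreatXor := by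
  intro x _
  unfold Spec_theGreatXor theGreatXor theGreatXor_alt
  rw [foldA_g, gL_decToBin x.toNat x le_rfl, altLoop_pure x.toNat x le_rfl]
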